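-- pv_equiv track=rewrite | github.com/ChezLorde/Code-Challenges | Foveated Rendering.py | get_rendering_grid
-- ===== SOURCE A (Python) =====
-- def diff(num1, num2):
--   return abs(num2 - num1)
--
-- def get_rendering_grid(eye_x, eye_y):
--
--
--   # Configuration
--   grid_length = 20
--   grid_height = 20
--
--   # Set up the list
--   grid = []
--
--   # Determine value based on distance to eye positions
--   for row_num in range(grid_height):
--     row = []
--
--     # Get the values for the row
--     for column_num in range(grid_length):
--       cell_value = 10
--
--       x_dist = diff(eye_x, row_num)
--       y_dist = diff(eye_y, column_num)
--
--       # If the cell is the one being focused on, set resolution to 100%.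
--       if row_num == eye_x and column_num == eye_y:
--         cell_value = 100
--
--       # If the cell is within 1 cell of the focus cell, set resolution to 50%
--       elif x_dist <= 1 and y_dist <= 1:
--         cell_value = 50
--
--       # If the cell is within 2 cells of the focus cell, set resolution to 25%
--       elif x_dist <= 2 and y_dist <= 2:
--         cell_value = 25
--
--       # Add the cell to the row list
--       row.append(cell_value)
--
--     # Add the row to the grid list
--     grid.append(row)
--
--   # Return list
--   return grid
-- ===== SOURCE B (Python) =====
-- def get_rendering_grid(eye_x, eye_y):
--   # Pre-fill with the default resolution, then update only the window of
--   # cells that can be within Chebyshev distance 2 of the eye position.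
--   grid = [[10] * 20 for _ in range(20)]
--   rlo, rhi = max(0, eye_x - 2), min(20, eye_x + 3)
--   clo, chi = max(0, eye_y - 2), min(20, eye_y + 3)
--   for r in range(rlo, rhi):
--     row = grid[r]
--     for c in range(clo, chi):
--       d = max(abs(r - eye_x), abs(c - eye_y))
--       row[c] = 100 if d == 0 else (50 if d <= 1 else 25)
--     grid[r] = row
--   return grid
-- ===== Notes on version B (the rewrite author's own statement) =====
-- stated objective: alternative
-- what changed: Instead of computing a distance-based value for each of the 400 cells in nested loops, B pre-fills the whole grid with the default 10 and computes values only for the clamped at-most-5x5 window of cells within Chebyshev distance 2 of the eye.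
import Mathlib
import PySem

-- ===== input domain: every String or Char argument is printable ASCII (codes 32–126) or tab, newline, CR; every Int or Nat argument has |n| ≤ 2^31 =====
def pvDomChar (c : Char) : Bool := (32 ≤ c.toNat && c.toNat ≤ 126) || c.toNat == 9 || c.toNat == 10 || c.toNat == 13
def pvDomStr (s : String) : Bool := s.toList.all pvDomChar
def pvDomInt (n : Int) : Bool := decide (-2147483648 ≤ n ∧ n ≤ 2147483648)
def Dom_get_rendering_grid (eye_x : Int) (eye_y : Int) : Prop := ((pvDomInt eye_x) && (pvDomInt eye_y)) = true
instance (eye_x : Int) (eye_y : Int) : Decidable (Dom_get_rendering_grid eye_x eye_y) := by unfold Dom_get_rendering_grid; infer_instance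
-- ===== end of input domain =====

-- B pre-fills the 20x20 grid with the default 10 and then computes values only
-- for the clamped ≤5x5 window of cells within Chebyshev distance 2 of the eye,
-- instead of A's per-cell branching over all 400 cells (objective: alternative).

-- ===== PORT A =====
def diff (num1 num2 : Int) : Int := |num2 - num1|

def get_rendering_grid (eye_x : Int) (eye_y : Int) : List (List Int) :=
  let grid_length : Int := 20
  let grid_height : Int := 20
  (PySem.List.pyRange 0 grid_height 1).foldl (fun grid row_num =>
    let row : List Int :=
      (PySem.List.pyRange 0 grid_length 1).foldl (fun row column_num =>
        let cell_value : Int := 10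
        let x_dist := diff eye_x row_num
        let y_dist := diff eye_y column_num
        let cell_value :=
          if row_num = eye_x ∧ column_num = eye_y then (100 : Int)
          else if x_dist ≤ 1 ∧ y_dist ≤ 1 then 50
          else if x_dist ≤ 2 ∧ y_dist ≤ 2 then 25
          else cell_value
        row ++ [cell_value]) []
    grid ++ [row]) []

-- ===== PORT B =====
def get_rendering_grid_alt (eye_x : Int) (eye_y : Int) : List (List Int) :=
  let grid0 := List.replicate 20 (List.replicate 20 (10 : Int))
  let rlo := max 0 (eye_x - 2)
  let rhi := min 20 (eye_x + 3)
  let clo := max 0 (eye_y - 2)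
  let chi := min 20 (eye_y + 3)
  (PySem.List.pyRange rlo rhi 1).foldl (fun grid r =>
    -- r ∈ [rlo, rhi) ⊆ [0, 20), so grid[r] is always in range: getD is exact here
    let row := grid.getD r.toNat []
    let row :=
      (PySem.List.pyRange clo chi 1).foldl (fun row c =>
        let d := max |r - eye_x| |c - eye_y|
        row.set c.toNat (if d = 0 then (100 : Int) else if d ≤ 1 then 50 else 25)) row
    grid.set r.toNat row) grid0

-- ===== PRECONDITION & SPEC =====
def Spec_get_rendering_grid (eye_x : Int) (eye_y : Int) (out : List (List Int)) : Prop := out = get_rendering_grid_alt eye_x eye_y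
instance (eye_x : Int) (eye_y : Int) (out : List (List Int)) : Decidable (Spec_get_rendering_grid eye_x eye_y out) := by unfold Spec_get_rendering_grid; infer_instance

-- ===== CLAIM (what is proved, stated in full; the proofs are below) =====
def Claim_equal_get_rendering_grid : Prop := ∀ (eye_x : Int) (eye_y : Int), Dom_get_rendering_grid eye_x eye_y → Spec_get_rendering_grid eye_x eye_y (get_rendering_grid eye_x eye_y)

-- ===== LEMMAS AND PROOFS =====

-- A's cell value as a standalone function (definitionally A's inner-loop body)
def cellA (eye_x eye_y r c : Int) : Int :=
  if r = eye_x ∧ c = eye_y then 100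
  else if diff eye_x r ≤ 1 ∧ diff eye_y c ≤ 1 then 50
  else if diff eye_x r ≤ 2 ∧ diff eye_y c ≤ 2 then 25
  else 10

-- B's cell value as a standalone function (definitionally B's inner-loop body)
def cellB (eye_x eye_y r c : Int) : Int :=
  if max |r - eye_x| |c - eye_y| = 0 then 100
  else if max |r - eye_x| |c - eye_y| ≤ 1 then 50
  else 25

-- B's inner loop over one row, as a named function
def rowUpd (eye_x eye_y r : Int) (l : List Int) : List Int :=
  (PySem.List.pyRange (max 0 (eye_y - 2)) (min 20 (eye_y + 3)) 1).foldl
    (fun row c => row.set c.toNat (cellB eye_x eye_y r c)) l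

-- append-fold is map
theorem foldl_append_map {α β : Type} (f : α → β) :
    ∀ (l : List α) (acc : List β),
      l.foldl (fun a x => a ++ [f x]) acc = acc ++ l.map f := by
  intro l
  induction l with
  | nil => intro acc; simp
  | cons x xs ih => intro acc; simp [List.foldl_cons, ih]

theorem A_eq_map (eye_x eye_y : Int) :
    get_rendering_grid eye_x eye_y =
      (PySem.List.pyRange 0 20 1).map (fun r =>
        (PySem.List.pyRange 0 20 1).map (cellA eye_x eye_y r)) := by
  simp only [get_rendering_grid, foldl_append_map, List.nil_append]
  rfl

theorem B_eq_fold (eye_x eye_y : Int) :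
    get_rendering_grid_alt eye_x eye_y =
      (PySem.List.pyRange (max 0 (eye_x - 2)) (min 20 (eye_x + 3)) 1).foldl
        (fun g r => g.set r.toNat (rowUpd eye_x eye_y r (g.getD r.toNat [])))
        (List.replicate 20 (List.replicate 20 10)) := rfl

-- inner set-loop: length is preserved
theorem inner_len (v : Int → Int) :
    ∀ (C : List Int) (l : List Int),
      (C.foldl (fun row c => row.set c.toNat (v c)) l).length = l.length := by
  intro C
  induction C with
  | nil => intro l; rfl
  | cons c cs ih =>
    intro l
    rw [List.foldl_cons, ih]
    exact List.length_set ..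

-- inner set-loop: elementwise value
theorem inner_get (v : Int → Int) :
    ∀ (C : List Int) (l : List Int), (∀ c ∈ C, 0 ≤ c) →
      ∀ (j : Nat), j < l.length →
        (C.foldl (fun row c => row.set c.toNat (v c)) l)[j]? =
          some (if (j : Int) ∈ C then v j else l.getD j 0) := by
  intro C
  induction C with
  | nil =>
    intro l _ j hj
    rw [List.foldl_nil, List.getElem?_eq_getElem hj, List.getD_eq_getElem l 0 hj]
    simp
  | cons c cs ih =>
    intro l hC j hj
    have hc : 0 ≤ c := hC c (by simp)
    rw [List.foldl_cons, ih _ (fun x hx => hC x (by simp [hx])) j (by simpa using hj)]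
    have hset : (l.set c.toNat (v c)).getD j 0 =
        if c = (j : Int) then v c else l.getD j 0 := by
      rw [List.getD_eq_getElem _ 0 (by simpa using hj), List.getD_eq_getElem l 0 hj,
        List.getElem_set]
      by_cases h : c = (j : Int)
      · have ht : c.toNat = j := by omega
        rw [if_pos ht, if_pos h]
      · have ht : c.toNat ≠ j := by omega
        rw [if_neg ht, if_neg h]
    rw [hset]
    by_cases hmem : (j : Int) ∈ cs
    · rw [if_pos hmem, if_pos (List.mem_cons_of_mem c hmem)]
    · rw [if_neg hmem]
      by_cases hcj : c = (j : Int)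
      · rw [if_pos hcj, if_pos (show ((j : Nat) : Int) ∈ c :: cs by
          rw [hcj]; exact List.mem_cons_self ..), hcj]
      · rw [if_neg hcj, if_neg (by
          simp only [List.mem_cons, not_or]
          exact ⟨fun h => hcj h.symm, hmem⟩)]

-- outer set-loop: length is preserved
theorem outer_len (F : Int → List Int → List Int) :
    ∀ (R : List Int) (g : List (List Int)),
      (R.foldl (fun g r => g.set r.toNat (F r (g.getD r.toNat []))) g).length = g.length := by
  intro R
  induction R with
  | nil => intro g; rfl
  | cons r rs ih =>
    intro g
    rw [List.foldl_cons, ih]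
    exact List.length_set ..

-- outer set-loop: rowwise value (each row index is visited at most once)
theorem outer_get (F : Int → List Int → List Int) :
    ∀ (R : List Int) (g : List (List Int)), R.Nodup → (∀ r ∈ R, 0 ≤ r) →
      ∀ (i : Nat), i < g.length →
        (R.foldl (fun g r => g.set r.toNat (F r (g.getD r.toNat []))) g)[i]? =
          some (if (i : Int) ∈ R then F i (g.getD i []) else g.getD i []) := by
  intro R
  induction R with
  | nil =>
    intro g _ _ i hi
    rw [List.foldl_nil, List.getElem?_eq_getElem hi, List.getD_eq_getElem g [] hi]
    simp
  | cons r rs ih =>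
    intro g hnd hR i hi
    have hr : 0 ≤ r := hR r (by simp)
    have hnd' : rs.Nodup := hnd.of_cons
    rw [List.foldl_cons,
      ih (g.set r.toNat (F r (g.getD r.toNat []))) hnd'
        (fun x hx => hR x (by simp [hx])) i (by simpa using hi)]
    have hget : (g.set r.toNat (F r (g.getD r.toNat []))).getD i [] =
        if r = (i : Int) then F i (g.getD i []) else g.getD i [] := by
      rw [List.getD_eq_getElem _ [] (by simpa using hi), List.getD_eq_getElem g [] hi,
        List.getElem_set]
      by_cases h : r = (i : Int)
      · have ht : r.toNat = i := by omega
        have hF : g.getD r.toNat [] = g[i] := by rw [ht]; exact List.getD_eq_getElem g [] hi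
        rw [if_pos ht, if_pos h, hF, h]
      · have ht : r.toNat ≠ i := by omega
        rw [if_neg ht, if_neg h]
    rw [hget]
    by_cases hmem : (i : Int) ∈ rs
    · have hri : ¬ (r = (i : Int)) := by
        intro h; subst h; exact (List.nodup_cons.mp hnd).1 hmem
      rw [if_pos hmem, if_pos (List.mem_cons_of_mem r hmem), if_neg hri]
    · rw [if_neg hmem]
      by_cases hri : r = (i : Int)
      · rw [if_pos hri, if_pos (show ((i : Nat) : Int) ∈ r :: rs by
          rw [hri]; exact List.mem_cons_self ..)]
      · rw [if_neg hri, if_neg (by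
          simp only [List.mem_cons, not_or]
          exact ⟨fun h => hri h.symm, hmem⟩)]

-- arithmetic: A's cell value equals B's window rule on in-grid coordinates
theorem cell_arith (eye_x eye_y r c : Int) (hr0 : 0 ≤ r) (hr1 : r < 20)
    (hc0 : 0 ≤ c) (hc1 : c < 20) :
    cellA eye_x eye_y r c =
      if (max 0 (eye_x - 2) ≤ r ∧ r < min 20 (eye_x + 3)) ∧
         (max 0 (eye_y - 2) ≤ c ∧ c < min 20 (eye_y + 3)) then
        cellB eye_x eye_y r c
      else 10 := by
  simp only [cellA, cellB, diff, Int.abs_eq_natAbs]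
  split_ifs <;> omega

-- the rows agree pointwise
theorem row_eq (eye_x eye_y : Int) (i : Nat) (hi : i < 20) :
    (PySem.List.pyRange 0 20 1).map (cellA eye_x eye_y i) =
      (if (i : Int) ∈ PySem.List.pyRange (max 0 (eye_x - 2)) (min 20 (eye_x + 3)) 1 then
        rowUpd eye_x eye_y i (List.replicate 20 10)
      else List.replicate 20 10) := by
  have hRi : ((i : Int) ∈ PySem.List.pyRange (max 0 (eye_x - 2)) (min 20 (eye_x + 3)) 1) ↔
      (max 0 (eye_x - 2) ≤ (i : Int) ∧ (i : Int) < min 20 (eye_x + 3)) :=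
    PySem.List.mem_pyRange_one
  apply List.ext_getElem?
  intro j
  by_cases hj : j < 20
  · have hlhs : ((PySem.List.pyRange 0 20 1).map (cellA eye_x eye_y i))[j]? =
        some (cellA eye_x eye_y i (0 + j)) := by
      rw [List.getElem?_map, PySem.List.getElem?_pyRange_one 0 20 j,
        if_pos (show j < ((20 : Int) - 0).toNat by omega)]
      rfl
    have hz : ((0 : Int) + (j : Nat)) = (j : Int) := by omega
    rw [hz] at hlhs
    rw [hlhs, cell_arith eye_x eye_y i j (by omega) (by omega) (by omega) (by omega)]
    have hrep : (List.replicate 20 (10 : Int)).getD j 0 = 10 := by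
      rw [List.getD_eq_getElem _ 0 (by simpa using hj)]
      exact List.getElem_replicate ..
    have hCj : ((j : Int) ∈ PySem.List.pyRange (max 0 (eye_y - 2)) (min 20 (eye_y + 3)) 1) ↔
        (max 0 (eye_y - 2) ≤ (j : Int) ∧ (j : Int) < min 20 (eye_y + 3)) :=
      PySem.List.mem_pyRange_one
    by_cases hR : (i : Int) ∈ PySem.List.pyRange (max 0 (eye_x - 2)) (min 20 (eye_x + 3)) 1
    · rw [if_pos hR,
        show rowUpd eye_x eye_y i (List.replicate 20 10) =
          (PySem.List.pyRange (max 0 (eye_y - 2)) (min 20 (eye_y + 3)) 1).foldl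
            (fun row c => row.set c.toNat (cellB eye_x eye_y i c)) (List.replicate 20 10)
          from rfl,
        inner_get (cellB eye_x eye_y i) _ _
          (fun c hc => by have := (PySem.List.mem_pyRange_one.mp hc).1; omega) j
          (by simpa using hj),
        hrep]
      have hRw := hRi.mp hR
      by_cases hC : (j : Int) ∈ PySem.List.pyRange (max 0 (eye_y - 2)) (min 20 (eye_y + 3)) 1
      · rw [if_pos ⟨hRw, hCj.mp hC⟩, if_pos hC]
      · rw [if_neg (fun h => hC (hCj.mpr h.2)), if_neg hC]
    · rw [if_neg hR,
        List.getElem?_eq_getElem (l := List.replicate 20 (10 : Int)) (by simpa using hj),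
        List.getElem_replicate,
        if_neg (fun h => hR (hRi.mpr h.1))]
  · have hj' : 20 ≤ j := by omega
    rw [List.getElem?_eq_none (by
      simp only [List.length_map, PySem.List.length_pyRange_one]; omega)]
    by_cases hR : (i : Int) ∈ PySem.List.pyRange (max 0 (eye_x - 2)) (min 20 (eye_x + 3)) 1
    · rw [if_pos hR, List.getElem?_eq_none (by
        rw [show rowUpd eye_x eye_y i (List.replicate 20 10) =
            (PySem.List.pyRange (max 0 (eye_y - 2)) (min 20 (eye_y + 3)) 1).foldl
              (fun row c => row.set c.toNat (cellB eye_x eye_y i c)) (List.replicate 20 10)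
            from rfl,
          inner_len]
        simpa using hj')]
    · rw [if_neg hR, List.getElem?_eq_none (by simpa using hj')]

-- ===== VERDICT (by name: the statement is the Claim_ definition above) =====
theorem get_rendering_grid_spec : Claim_equal_get_rendering_grid := by
  intro eye_x eye_y _
  show get_rendering_grid eye_x eye_y = get_rendering_grid_alt eye_x eye_y
  rw [A_eq_map, B_eq_fold]
  apply List.ext_getElem?
  intro i
  by_cases hi : i < 20
  · rw [List.getElem?_map, PySem.List.getElem?_pyRange_one 0 20 i,
      if_pos (show i < ((20 : Int) - 0).toNat by omega),
      outer_get (rowUpd eye_x eye_y) _ _ (PySem.List.nodup_pyRange_one _ _)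
        (fun r hr => by have := (PySem.List.mem_pyRange_one.mp hr).1; omega) i
        (by simpa using hi)]
    have hrep : (List.replicate 20 (List.replicate 20 (10 : Int))).getD i [] =
        List.replicate 20 10 := by
      rw [List.getD_eq_getElem _ [] (by simpa using hi)]
      exact List.getElem_replicate ..
    rw [hrep, Option.map_some]
    congr 1
    show (PySem.List.pyRange 0 20 1).map (cellA eye_x eye_y (0 + i)) = _
    have hz : ((0 : Int) + (i : Nat)) = (i : Int) := by omega
    rw [hz, row_eq eye_x eye_y i hi]
  · have hi' : 20 ≤ i := by omega
    rw [List.getElem?_eq_none (by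
      simp only [List.length_map, PySem.List.length_pyRange_one]; omega)]
    rw [List.getElem?_eq_none (by rw [outer_len]; simpa using hi')]
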